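-- pv_equiv track=rewrite | github.com/moloney/tapeworm | example_conf/tapeworm_conf.py | storage_chooser
-- ===== SOURCE A (Python) =====
-- cleaning_prefix = 'CLN'
--
-- def storage_chooser(barcodes):
--     '''Choose storage tapes by avoiding cleaning tapes and prefering LTO5'''
--     selection = None
--     for barcode in barcodes:
--         if barcode.startswith(cleaning_prefix):
--             continue
--         if barcode.endswith('L5'):
--             return barcode
--         elif selection is None:
--             selection = barcode
--     return selection
-- ===== SOURCE B (Python) =====
-- cleaning_prefix = 'CLN'
--
-- def storage_chooser(barcodes):
--     '''Choose storage tapes by avoiding cleaning tapes and prefering LTO5'''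
--     ranked = [(0 if b.endswith('L5') else 1, i, b)
--               for i, b in enumerate(barcodes)
--               if not b.startswith(cleaning_prefix)]
--     return min(ranked)[2] if ranked else None
-- ===== Notes on version B (the rewrite author's own statement) =====
-- stated objective: alternative
-- what changed: Replaces A's early-returning scan with a stateful 'selection' variable by a decorate-and-minimize scheme: build (priority, index, barcode) tuples for all non-cleaning tapes (priority 0 for L5, 1 otherwise) and return the lexicographic minimum's barcode.
import Mathlib
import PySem

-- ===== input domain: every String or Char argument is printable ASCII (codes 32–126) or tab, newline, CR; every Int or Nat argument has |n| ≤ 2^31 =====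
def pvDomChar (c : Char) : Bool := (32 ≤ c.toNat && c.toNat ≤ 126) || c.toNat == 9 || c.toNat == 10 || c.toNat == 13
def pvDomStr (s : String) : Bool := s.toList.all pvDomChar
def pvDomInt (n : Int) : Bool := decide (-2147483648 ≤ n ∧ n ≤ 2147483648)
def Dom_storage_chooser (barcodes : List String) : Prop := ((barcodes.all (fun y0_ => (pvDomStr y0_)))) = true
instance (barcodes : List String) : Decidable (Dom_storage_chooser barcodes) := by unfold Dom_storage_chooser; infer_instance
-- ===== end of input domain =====

-- ===== PORT A =====
-- One honest line: B replaces A's early-returning scan with mutable selection by a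
-- decorate-and-minimize pass ((priority, index, barcode) tuples, then min); same O(n) cost.
def storage_chooser_loop (barcodes : List String) (selection : Option String) : Option String :=
  match barcodes with
  | [] => selection
  | barcode :: rest =>
    if PySem.Str.startswith barcode "CLN" then
      storage_chooser_loop rest selection
    else if PySem.Str.endswith barcode "L5" then
      some barcode
    else
      match selection with
      | none => storage_chooser_loop rest (some barcode)
      | some s => storage_chooser_loop rest (some s)

def storage_chooser (barcodes : List String) : Option String :=
  storage_chooser_loop barcodes none

-- ===== PORT B =====
-- Python tuple comparison (lexicographic), restricted to the triples B builds.
def tripLt (a b : Int × Int × String) : Bool :=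
  decide (a.1 < b.1) ||
    (a.1 == b.1 && (decide (a.2.1 < b.2.1) ||
      (a.2.1 == b.2.1 && decide (a.2.2 < b.2.2))))

-- Port of Python's min over a list (first minimal element); none on the empty list.
def pyMinTriple : List (Int × Int × String) → Option (Int × Int × String)
  | [] => none
  | x :: xs =>
    match pyMinTriple xs with
    | none => some x
    | some m => some (if tripLt m x then m else x)

def storage_chooser_alt (barcodes : List String) : Option String :=
  let ranked := (PySem.List.enumerate barcodes).filterMap (fun p =>
    if !(PySem.Str.startswith p.2 "CLN") then
      some ((if PySem.Str.endswith p.2 "L5" then (0 : Int) else 1), p.1, p.2)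
    else none)
  match pyMinTriple ranked with
  | some t => some t.2.2
  | none => none

-- ===== PRECONDITION & SPEC =====
def Spec_storage_chooser (barcodes : List String) (out : Option String) : Prop := out = storage_chooser_alt barcodes
instance (barcodes : List String) (out : Option String) : Decidable (Spec_storage_chooser barcodes out) := by unfold Spec_storage_chooser; infer_instance

-- ===== CLAIM (what is proved, stated in full; the proofs are below) =====
def Claim_equal_storage_chooser : Prop := ∀ (barcodes : List String), Dom_storage_chooser barcodes → Spec_storage_chooser barcodes (storage_chooser barcodes)

-- ===== LEMMAS AND PROOFS =====

-- abbreviations used only in proofs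
def pvNonCln (b : String) : Bool := !(PySem.Str.startswith b "CLN")
def pvEndsL5 (b : String) : Bool := PySem.Str.endswith b "L5"

def pvRanked (k : Int) (l : List String) : List (Int × Int × String) :=
  (PySem.List.enumerate l k).filterMap (fun p =>
    if pvNonCln p.2 then
      some ((if pvEndsL5 p.2 then (0 : Int) else 1), p.1, p.2)
    else none)

theorem pvRanked_nil (k : Int) : pvRanked k [] = [] := by
  simp [pvRanked, PySem.List.enumerate_nil]

theorem pvRanked_cons (k : Int) (b : String) (rest : List String) :
    pvRanked k (b :: rest) =
      (if pvNonCln b then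
        [((if pvEndsL5 b then (0 : Int) else 1), k, b)]
       else []) ++ pvRanked (k + 1) rest := by
  simp only [pvRanked, PySem.List.enumerate_cons, List.filterMap_cons]
  by_cases h : pvNonCln b <;> simp [h]

-- A's result in filter / find? / head? form (bridge used on both sides).
theorem storage_chooser_loop_eq (barcodes : List String) (selection : Option String) :
    storage_chooser_loop barcodes selection =
      (let filtered := barcodes.filter pvNonCln
       match filtered.find? pvEndsL5 with
       | some b => some b
       | none => selection.orElse (fun _ => filtered.head?)) := by
  induction barcodes generalizing selection with
  | nil => cases selection <;> simp [storage_chooser_loop, Option.orElse]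
  | cons b rest ih =>
    simp only [storage_chooser_loop]
    by_cases hc : PySem.Chars.startswith b.toList ['C', 'L', 'N']
    all_goals by_cases h5 : PySem.Chars.endswith b.toList ['L', '5']
    all_goals cases selection <;>
      simp [hc, h5, ih, Option.orElse, pvNonCln, pvEndsL5]

-- Full characterisation of the minimum of the ranked list.
theorem pvMin_ranked (l : List String) (k : Int) :
    match pyMinTriple (pvRanked k l) with
    | none => l.filter pvNonCln = []
    | some m =>
        k ≤ m.2.1 ∧
        ((m.1 = 0 ∧ (l.filter pvNonCln).find? pvEndsL5 = some m.2.2) ∨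
         (m.1 = 1 ∧ (l.filter pvNonCln).find? pvEndsL5 = none ∧
           (l.filter pvNonCln).head? = some m.2.2)) := by
  induction l generalizing k with
  | nil => simp [pvRanked_nil, pyMinTriple]
  | cons b rest ih =>
    have IH := ih (k + 1)
    by_cases hc : pvNonCln b
    · have hf : (b :: rest).filter pvNonCln = b :: rest.filter pvNonCln := by
        simp [hc]
      by_cases h5 : pvEndsL5 b
      · -- priority-0 head: it is the minimum regardless of the tail
        have hx : pvRanked k (b :: rest) = ((0 : Int), k, b) :: pvRanked (k + 1) rest := by
          rw [pvRanked_cons]; simp [hc, h5]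
        have hfind : (b :: rest.filter pvNonCln).find? pvEndsL5 = some b := by
          simp [h5]
        rw [hx]; simp only [pyMinTriple]
        rcases hR : pyMinTriple (pvRanked (k + 1) rest) with _ | m
        · simp [hf, hfind]
        · rw [hR] at IH
          obtain ⟨hk, hdisj⟩ := IH
          have hlt : tripLt m ((0 : Int), k, b) = false := by
            have h1' : ¬ (m.2.1 < k) := by omega
            have h2' : m.2.1 ≠ k := by omega
            rcases hdisj with ⟨h0, -⟩ | ⟨h1, -⟩
            · simp [tripLt, h0, h1', h2']
            · simp [tripLt, h1]
          simp [hlt, hf, hfind]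
      · -- priority-1 head
        have h5' : pvEndsL5 b = false := by simpa using h5
        have hx : pvRanked k (b :: rest) = ((1 : Int), k, b) :: pvRanked (k + 1) rest := by
          rw [pvRanked_cons]; simp [hc, h5']
        have hfind : (b :: rest.filter pvNonCln).find? pvEndsL5
            = (rest.filter pvNonCln).find? pvEndsL5 := by
          simp [h5']
        rw [hx]; simp only [pyMinTriple]
        rcases hR : pyMinTriple (pvRanked (k + 1) rest) with _ | m
        · rw [hR] at IH
          simp [hf, IH, h5']
        · rw [hR] at IH
          obtain ⟨hk, hdisj⟩ := IH
          rcases hdisj with ⟨h0, hfnd⟩ | ⟨h1, hfnd, hhead⟩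
          · have hlt : tripLt m ((1 : Int), k, b) = true := by
              simp [tripLt, h0]
            simp only [hlt, if_true]
            exact ⟨by omega, Or.inl ⟨h0, by rw [hf, hfind]; exact hfnd⟩⟩
          · have hlt : tripLt m ((1 : Int), k, b) = false := by
              have h1' : ¬ (m.2.1 < k) := by omega
              have h2' : m.2.1 ≠ k := by omega
              simp [tripLt, h1, h1', h2']
            simp only [hlt, Bool.false_eq_true, if_false]
            refine ⟨le_refl k, Or.inr ⟨by trivial, ?_, ?_⟩⟩
            · rw [hf, hfind]; exact hfnd
            · rw [hf]; simp
    · -- cleaning tape: skipped on both sides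
      have hc' : pvNonCln b = false := by simpa using hc
      have hf : (b :: rest).filter pvNonCln = rest.filter pvNonCln := by
        simp [hc']
      have hx : pvRanked k (b :: rest) = pvRanked (k + 1) rest := by
        rw [pvRanked_cons]; simp [hc']
      rw [hx, hf]
      rcases hR : pyMinTriple (pvRanked (k + 1) rest) with _ | m
      all_goals rw [hR] at IH
      · exact IH
      · obtain ⟨hk, hdisj⟩ := IH
        exact ⟨by omega, hdisj⟩

theorem alt_eq (barcodes : List String) :
    storage_chooser_alt barcodes =
      (let filtered := barcodes.filter pvNonCln
       match filtered.find? pvEndsL5 with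
       | some b => some b
       | none => filtered.head?) := by
  have h := pvMin_ranked barcodes 0
  have hdef : storage_chooser_alt barcodes =
      match pyMinTriple (pvRanked 0 barcodes) with
      | some t => some t.2.2
      | none => none := rfl
  rcases hR : pyMinTriple (pvRanked 0 barcodes) with _ | m
  all_goals rw [hR] at h
  · simp [hdef, hR, h]
  · obtain ⟨-, hdisj⟩ := h
    rcases hdisj with ⟨-, hfind⟩ | ⟨-, hfind, hhead⟩
    · simp [hdef, hR, hfind]
    · simp [hdef, hR, hfind, hhead]

-- ===== VERDICT (by name: the statement is the Claim_ definition above) =====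
theorem storage_chooser_spec : Claim_equal_storage_chooser := by
  intro barcodes _
  show storage_chooser barcodes = storage_chooser_alt barcodes
  rw [storage_chooser, storage_chooser_loop_eq, alt_eq]
  simp [Option.orElse]
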